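-- pv_equiv track=rewrite | github.com/richaccelerad/interface_tools | drawing_scanner.py | determine_latest
-- ===== SOURCE A (Python) =====
-- from typing import Optional
--
-- def _revision_sort_key(rev: Optional[str]):
--     if rev is None:
--         return (0, 0, "")
--     if len(rev) == 1 and rev.isalpha():
--         return (2, 0, rev)
--     if rev.startswith("X") and rev[1:].isdigit():
--         return (1, int(rev[1:]), "")
--     return (2, 0, rev)
--
-- def is_letter_revision(rev: str) -> bool:
--     return len(rev) == 1 and rev.isalpha()
--
-- def determine_latest(revisions: list[Optional[str]]) -> Optional[str]:
--     """
--     Return whichever revision should be marked is_latest.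
--     Letter revisions outrank x-revisions; highest within each tier wins.
--     """
--     non_none = [r for r in revisions if r is not None]
--     if not non_none:
--         return None
--     letter_revs = [r for r in non_none if is_letter_revision(r)]
--     if letter_revs:
--         return max(letter_revs)
--     return max(non_none, key=_revision_sort_key)
-- ===== SOURCE B (Python) =====
-- from typing import Optional
--
-- def determine_latest(revisions: list[Optional[str]]) -> Optional[str]:
--     """Single pass: unified (tier, number, text) key; letters tier 3, X-numbers tier 1, others tier 2."""
--     best = None  # (key, revision) of the best revision seen so far
--     for r in revisions:
--         if r is None:
--             continue
--         if len(r) == 1 and r.isalpha():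
--             k = (3, 0, r)
--         elif r.startswith("X") and r[1:].isdigit():
--             k = (1, int(r[1:]), "")
--         else:
--             k = (2, 0, r)
--         if best is None or best[0] < k:
--             best = (k, r)
--     return best[1] if best is not None else None
-- ===== Notes on version B (the rewrite author's own statement) =====
-- stated objective: alternative
-- what changed: Replaces A's three intermediate list passes (filter non-None, filter letters, then one of two max calls with different keys) by a single loop over the input keeping the best (tier, number, text) key seen so far, with letters in a strictly higher tier so they win whenever present.
import Mathlib
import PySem

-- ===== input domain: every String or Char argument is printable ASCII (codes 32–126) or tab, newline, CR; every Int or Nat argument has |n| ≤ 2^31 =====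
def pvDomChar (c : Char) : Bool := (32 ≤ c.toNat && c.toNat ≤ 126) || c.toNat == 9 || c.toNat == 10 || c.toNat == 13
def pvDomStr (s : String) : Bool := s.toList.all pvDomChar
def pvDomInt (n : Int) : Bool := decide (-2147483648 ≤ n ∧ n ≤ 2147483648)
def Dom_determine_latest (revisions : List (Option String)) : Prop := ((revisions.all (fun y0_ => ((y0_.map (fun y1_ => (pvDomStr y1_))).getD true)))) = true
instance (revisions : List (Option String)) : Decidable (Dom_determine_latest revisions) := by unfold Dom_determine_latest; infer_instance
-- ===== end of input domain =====

-- B replaces A's filter-twice-then-two-max structure by one pass with a unified (tier, number, text) key (alternative decomposition, same cost).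

-- Python's `<` on (int, int, str) tuples: lexicographic comparison (exact; str `<` is Lean's String `<`)
def pyTupLt (a b : Int × Int × String) : Bool :=
  decide (a.1 < b.1) || (a.1 == b.1 && (decide (a.2.1 < b.2.1) || (a.2.1 == b.2.1 && decide (a.2.2 < b.2.2))))

-- ===== PORT A =====
def _revision_sort_key (rev : Option String) : Int × Int × String :=
  match rev with
  | none => (0, 0, "")
  | some r =>
    if PySem.Str.len r == 1 && PySem.Str.strIsalpha r then (2, 0, r)
    else if PySem.Str.startswith r "X" && PySem.Str.strIsdigit (PySem.Str.slice r (some 1) none) then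
      (1, (PySem.Int.ofStr? (PySem.Str.slice r (some 1) none)).getD 0, "")  -- the isdigit guard holds here, so int() never raises; getD 0 is unreachable
    else (2, 0, r)

def is_letter_revision (rev : String) : Bool :=
  PySem.Str.len rev == 1 && PySem.Str.strIsalpha rev

def determine_latest (revisions : List (Option String)) : Option String :=
  let non_none := revisions.filterMap id
  if non_none = [] then none
  else
    let letter_revs := non_none.filter is_letter_revision
    if letter_revs ≠ [] then PySem.List.max? letter_revs (fun r => r)
    else
      -- max(non_none, key=_revision_sort_key): first maximum under Python's tuple comparison, ported by hand (exact)
      non_none.foldl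
        (fun acc x =>
          match acc with
          | none => some x
          | some m => if pyTupLt (_revision_sort_key (some m)) (_revision_sort_key (some x)) then some x else some m)
        none

-- ===== PORT B =====
-- the unified key of Source B: letters tier 3, X-numbers tier 1, everything else tier 2
def pvAltKey (r : String) : Int × Int × String :=
  if PySem.Str.len r == 1 && PySem.Str.strIsalpha r then (3, 0, r)
  else if PySem.Str.startswith r "X" && PySem.Str.strIsdigit (PySem.Str.slice r (some 1) none) then
    (1, (PySem.Int.ofStr? (PySem.Str.slice r (some 1) none)).getD 0, "")
  else (2, 0, r)

def determine_latest_alt (revisions : List (Option String)) : Option String :=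
  (revisions.foldl
    (fun best r =>
      match r with
      | none => best
      | some s =>
        let k := pvAltKey s
        match best with
        | none => some (k, s)
        | some b => if pyTupLt b.1 k then some (k, s) else some b)
    none).map (fun b => b.2)

-- ===== PRECONDITION & SPEC =====
def Spec_determine_latest (revisions : List (Option String)) (out : Option String) : Prop := out = determine_latest_alt revisions
instance (revisions : List (Option String)) (out : Option String) : Decidable (Spec_determine_latest revisions out) := by unfold Spec_determine_latest; infer_instance

-- ===== CLAIM (what is proved, stated in full; the proofs are below) =====
def Claim_equal_determine_latest : Prop := ∀ (revisions : List (Option String)), Dom_determine_latest revisions → Spec_determine_latest revisions (determine_latest revisions)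

-- ===== LEMMAS AND PROOFS =====

-- the first-max fold both ports perform, with an explicit Bool comparison, key and accumulator
def maxStep {κ : Type} (lt : κ → κ → Bool) (key : String → κ) (acc : Option String) (x : String) : Option String :=
  match acc with | none => some x | some m => if lt (key m) (key x) then some x else some m

def maxF {κ : Type} (lt : κ → κ → Bool) (key : String → κ) (acc : Option String) (l : List String) : Option String :=
  l.foldl (maxStep lt key) acc

theorem maxStep_none {κ : Type} (lt : κ → κ → Bool) (key : String → κ) (x : String) :
    maxStep lt key none x = some x := rfl

theorem maxStep_some {κ : Type} (lt : κ → κ → Bool) (key : String → κ) (m x : String) :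
    maxStep lt key (some m) x = if lt (key m) (key x) then some x else some m := rfl

def strLtB (a b : String) : Bool := decide (a < b)

-- Python max(xs) with no key (A's letter branch) is the same fold with the plain String comparison
theorem max?_eq_maxF (l : List String) :
    PySem.List.max? l (fun r => r) = maxF strLtB (fun r => r) none l := by
  unfold PySem.List.max? maxF
  congr 1
  funext acc x
  cases acc with
  | none => rfl
  | some m => simp [maxStep, strLtB]

-- A's hand fold in the no-letter branch is maxF with the tuple comparison
theorem a_foldl_eq_maxF (l : List String) :
    l.foldl
      (fun acc x =>
        match acc with
        | none => some x
        | some m => if pyTupLt (_revision_sort_key (some m)) (_revision_sort_key (some x)) then some x else some m)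
      none
    = maxF pyTupLt (fun r => _revision_sort_key (some r)) none l := by
  unfold maxF
  congr 1

-- B's pair-carrying fold computes maxF with key pvAltKey
theorem alt_foldl_eq (l : List String) (acc : Option String) :
    l.foldl
      (fun best s =>
        let k := pvAltKey s
        match best with
        | none => some (k, s)
        | some b => if pyTupLt b.1 k then some (k, s) else some b)
      (acc.map (fun m => (pvAltKey m, m)))
    = (maxF pyTupLt pvAltKey acc l).map (fun m => (pvAltKey m, m)) := by
  induction l generalizing acc with
  | nil => rfl
  | cons a t ih =>
    have hstep :
        (let k := pvAltKey a
         match acc.map (fun m => (pvAltKey m, m)) with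
         | none => some (k, a)
         | some b => if pyTupLt b.1 k then some (k, a) else some b)
        = ((maxStep pyTupLt pvAltKey acc a).map (fun m => (pvAltKey m, m))) := by
      cases acc with
      | none => rfl
      | some m => by_cases h : pyTupLt (pvAltKey m) (pvAltKey a) <;> simp [maxStep_some, h]
    simp only [List.foldl_cons]
    rw [hstep, ih]
    simp only [maxF, List.foldl_cons]

-- skipping the None entries is folding over filterMap id
theorem alt_skip_none (l : List (Option String)) (acc : Option ((Int × Int × String) × String)) :
    l.foldl
      (fun best r =>
        match r with
        | none => best
        | some s =>
          let k := pvAltKey s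
          match best with
          | none => some (k, s)
          | some b => if pyTupLt b.1 k then some (k, s) else some b)
      acc
    = (l.filterMap id).foldl
      (fun best s =>
        let k := pvAltKey s
        match best with
        | none => some (k, s)
        | some b => if pyTupLt b.1 k then some (k, s) else some b)
      acc := by
  induction l generalizing acc with
  | nil => rfl
  | cons a t ih => cases a <;> simp [ih]

-- congruence: maxF only looks at the comparison outcomes between members
theorem maxF_congr {κ₁ κ₂ : Type} (lt1 : κ₁ → κ₁ → Bool) (lt2 : κ₂ → κ₂ → Bool)
    (k1 : String → κ₁) (k2 : String → κ₂) (l : List String) :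
    ∀ acc : Option String,
    (∀ m, acc = some m → ∀ y ∈ l, lt1 (k1 m) (k1 y) = lt2 (k2 m) (k2 y)) →
    (∀ x ∈ l, ∀ y ∈ l, lt1 (k1 x) (k1 y) = lt2 (k2 x) (k2 y)) →
    maxF lt1 k1 acc l = maxF lt2 k2 acc l := by
  induction l with
  | nil => intro acc _ _; rfl
  | cons a t ih =>
    intro acc hacc h
    cases acc with
    | none =>
      simp only [maxF, List.foldl_cons, maxStep_none]
      exact ih (some a)
        (fun m hm y hy => by cases hm; exact h a (by simp) y (by simp [hy]))
        (fun x hx y hy => h x (by simp [hx]) y (by simp [hy]))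
    | some m =>
      simp only [maxF, List.foldl_cons, maxStep_some]
      rw [hacc m rfl a (by simp)]
      by_cases hlt : lt2 (k2 m) (k2 a) = true
      · rw [if_pos hlt]
        exact ih (some a)
          (fun m' hm' y hy => by cases hm'; exact h a (by simp) y (by simp [hy]))
          (fun x hx y hy => h x (by simp [hx]) y (by simp [hy]))
      · rw [if_neg hlt]
        exact ih (some m)
          (fun m' hm' y hy => by cases hm'; exact hacc m rfl y (by simp [hy]))
          (fun x hx y hy => h x (by simp [hx]) y (by simp [hy]))

-- dominance: if every p-element outranks every non-p element, the non-p elements can be filtered away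
theorem maxF_dom_some {κ : Type} (lt : κ → κ → Bool) (key : String → κ) (p : String → Bool)
    (hasym : ∀ a b, lt a b = true → lt b a = false) :
    ∀ (t : List String) (m : String), p m = true →
    (∀ x ∈ t, ∀ y ∈ t, p x = true → p y = false → lt (key y) (key x) = true) →
    (∀ y ∈ t, p y = false → lt (key y) (key m) = true) →
    maxF lt key (some m) t = maxF lt key (some m) (t.filter p) := by
  intro t
  induction t with
  | nil => intro m _ _ _; rfl
  | cons a t ih =>
    intro m hpm hdom hm
    by_cases hpa : p a = true
    · simp only [List.filter_cons, hpa, if_pos, maxF, List.foldl_cons, maxStep_some]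
      by_cases hlt : lt (key m) (key a) = true
      · rw [if_pos hlt]
        exact ih a hpa
          (fun x hx y hy => hdom x (by simp [hx]) y (by simp [hy]))
          (fun y hy hpy => hdom a (by simp) y (by simp [hy]) hpa hpy)
      · rw [if_neg hlt]
        exact ih m hpm
          (fun x hx y hy => hdom x (by simp [hx]) y (by simp [hy]))
          (fun y hy hpy => hm y (by simp [hy]) hpy)
    · have hpa' : p a = false := by simpa using hpa
      have hlt : lt (key a) (key m) = true := hm a (by simp) hpa'
      simp only [List.filter_cons, hpa', Bool.false_eq_true, if_false, maxF, List.foldl_cons,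
        maxStep_some, hasym _ _ hlt, if_false]
      exact ih m hpm
        (fun x hx y hy => hdom x (by simp [hx]) y (by simp [hy]))
        (fun y hy hpy => hm y (by simp [hy]) hpy)

theorem maxF_dom_start {κ : Type} (lt : κ → κ → Bool) (key : String → κ) (p : String → Bool)
    (hasym : ∀ a b, lt a b = true → lt b a = false) :
    ∀ (t : List String) (m : String), p m = false →
    (∀ x ∈ t, ∀ y ∈ t, p x = true → p y = false → lt (key y) (key x) = true) →
    (∀ x ∈ t, p x = true → lt (key m) (key x) = true) →
    t.filter p ≠ [] →
    maxF lt key (some m) t = maxF lt key none (t.filter p) := by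
  intro t
  induction t with
  | nil => intro m _ _ _ hf; simp at hf
  | cons a t ih =>
    intro m hpm hdom hc hf
    by_cases hpa : p a = true
    · have hlt : lt (key m) (key a) = true := hc a (by simp) hpa
      simp only [List.filter_cons, hpa, if_pos, maxF, List.foldl_cons, maxStep_some, maxStep_none,
        hlt]
      exact maxF_dom_some lt key p hasym t a hpa
        (fun x hx y hy => hdom x (by simp [hx]) y (by simp [hy]))
        (fun y hy hpy => hdom a (by simp) y (by simp [hy]) hpa hpy)
    · have hpa' : p a = false := by simpa using hpa
      have hf' : t.filter p ≠ [] := by simpa [List.filter_cons, hpa'] using hf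
      simp only [List.filter_cons, hpa', Bool.false_eq_true, if_false, maxF, List.foldl_cons,
        maxStep_some]
      by_cases hlt : lt (key m) (key a) = true
      · rw [if_pos hlt]
        exact ih a hpa'
          (fun x hx y hy => hdom x (by simp [hx]) y (by simp [hy]))
          (fun x hx hpx => hdom x (by simp [hx]) a (by simp) hpx hpa')
          hf'
      · rw [if_neg hlt]
        exact ih m hpm
          (fun x hx y hy => hdom x (by simp [hx]) y (by simp [hy]))
          (fun x hx hpx => hc x (by simp [hx]) hpx)
          hf'

theorem maxF_dom {κ : Type} (lt : κ → κ → Bool) (key : String → κ) (p : String → Bool)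
    (hasym : ∀ a b, lt a b = true → lt b a = false) (l : List String)
    (hdom : ∀ x ∈ l, ∀ y ∈ l, p x = true → p y = false → lt (key y) (key x) = true)
    (hf : l.filter p ≠ []) :
    maxF lt key none l = maxF lt key none (l.filter p) := by
  cases l with
  | nil => rfl
  | cons a t =>
    by_cases hpa : p a = true
    · simp only [List.filter_cons, hpa, if_pos, maxF, List.foldl_cons, maxStep_none]
      exact maxF_dom_some lt key p hasym t a hpa
        (fun x hx y hy => hdom x (by simp [hx]) y (by simp [hy]))
        (fun y hy hpy => hdom a (by simp) y (by simp [hy]) hpa hpy)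
    · have hpa' : p a = false := by simpa using hpa
      have hf' : t.filter p ≠ [] := by simpa [List.filter_cons, hpa'] using hf
      simp only [List.filter_cons, hpa', Bool.false_eq_true, if_false, maxF, List.foldl_cons,
        maxStep_none]
      exact maxF_dom_start lt key p hasym t a hpa'
        (fun x hx y hy => hdom x (by simp [hx]) y (by simp [hy]))
        (fun x hx hpx => hdom x (by simp [hx]) a (by simp) hpx hpa')
        hf'

-- the tuple comparison is asymmetric
theorem pyTupLt_asym (a b : Int × Int × String) : pyTupLt a b = true → pyTupLt b a = false := by
  unfold pyTupLt
  intro h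
  simp only [Bool.or_eq_true, Bool.and_eq_true, decide_eq_true_eq, beq_iff_eq] at h
  simp only [Bool.or_eq_false_iff, Bool.and_eq_false_iff, decide_eq_false_iff_not, beq_eq_false_iff_ne]
  rcases h with h1 | ⟨he1, h2 | ⟨he2, h3⟩⟩
  · exact ⟨by omega, Or.inl (by omega)⟩
  · exact ⟨by omega, Or.inr ⟨by omega, Or.inl (by omega)⟩⟩
  · exact ⟨by omega, Or.inr ⟨by omega, Or.inr (lt_asymm h3)⟩⟩

-- key facts relating the two key functions
theorem altKey_of_not_letter (x : String) (hx : is_letter_revision x = false) :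
    _revision_sort_key (some x) = pvAltKey x := by
  unfold is_letter_revision at hx
  show (if PySem.Str.len x == 1 && PySem.Str.strIsalpha x then ((2 : Int), (0 : Int), x)
       else if PySem.Str.startswith x "X" && PySem.Str.strIsdigit (PySem.Str.slice x (some 1) none) then
         ((1 : Int), (PySem.Int.ofStr? (PySem.Str.slice x (some 1) none)).getD 0, "")
       else ((2 : Int), (0 : Int), x)) = pvAltKey x
  rw [pvAltKey, hx]
  simp only [Bool.false_eq_true, if_false]

theorem altKey_letter_dominates (x y : String)
    (hx : is_letter_revision x = true) (hy : is_letter_revision y = false) :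
    pyTupLt (pvAltKey y) (pvAltKey x) = true := by
  unfold is_letter_revision at hx hy
  rw [pvAltKey, pvAltKey, hx, hy]
  simp only [if_pos, Bool.false_eq_true, if_false]
  by_cases h2 : (PySem.Str.startswith y "X" && PySem.Str.strIsdigit (PySem.Str.slice y (some 1) none)) = true
  · rw [if_pos h2]; rfl
  · rw [if_neg h2]; rfl

theorem altKey_letter_lt_iff (x y : String)
    (hx : is_letter_revision x = true) (hy : is_letter_revision y = true) :
    pyTupLt (pvAltKey x) (pvAltKey y) = strLtB x y := by
  unfold is_letter_revision at hx hy
  rw [pvAltKey, pvAltKey, hx, hy]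
  simp only [if_pos]
  unfold pyTupLt strLtB
  simp

theorem A_eq_unified (ns : List String) :
    (if ns = [] then none
     else if ns.filter is_letter_revision ≠ [] then PySem.List.max? (ns.filter is_letter_revision) (fun r => r)
     else ns.foldl
       (fun acc x =>
         match acc with
         | none => some x
         | some m => if pyTupLt (_revision_sort_key (some m)) (_revision_sort_key (some x)) then some x else some m)
       none)
    = maxF pyTupLt pvAltKey none ns := by
  by_cases hns : ns = []
  · subst hns; rfl
  · rw [if_neg hns]
    by_cases hl : ns.filter is_letter_revision = []
    · rw [if_neg (by simp [hl]), a_foldl_eq_maxF]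
      refine maxF_congr pyTupLt pyTupLt _ _ ns none (by intro m hm; cases hm) ?_
      intro x hx y hy
      have hx' : is_letter_revision x = false := by
        by_contra hc
        exact (List.ne_nil_of_mem (List.mem_filter.mpr ⟨hx, by simpa using hc⟩)) hl
      have hy' : is_letter_revision y = false := by
        by_contra hc
        exact (List.ne_nil_of_mem (List.mem_filter.mpr ⟨hy, by simpa using hc⟩)) hl
      rw [altKey_of_not_letter x hx', altKey_of_not_letter y hy']
    · rw [if_pos hl, max?_eq_maxF,
        maxF_dom pyTupLt pvAltKey is_letter_revision pyTupLt_asym ns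
          (fun x hx y hy hpx hpy => altKey_letter_dominates x y hpx hpy) hl]
      refine maxF_congr strLtB pyTupLt _ _ (ns.filter is_letter_revision) none (by intro m hm; cases hm) ?_
      intro x hx y hy
      exact (altKey_letter_lt_iff x y (List.mem_filter.mp hx).2 (List.mem_filter.mp hy).2).symm

-- ===== VERDICT (by name: the statement is the Claim_ definition above) =====
theorem determine_latest_spec : Claim_equal_determine_latest := by
  intro revisions _
  unfold Spec_determine_latest
  have hB : determine_latest_alt revisions
      = ((maxF pyTupLt pvAltKey none (revisions.filterMap id)).map (fun m => (pvAltKey m, m))).map (fun b => b.2) := by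
    unfold determine_latest_alt
    rw [alt_skip_none]
    have h2 := alt_foldl_eq (revisions.filterMap id) none
    simp only [Option.map_none] at h2
    rw [h2]
  have hA : determine_latest revisions = maxF pyTupLt pvAltKey none (revisions.filterMap id) := by
    show (if revisions.filterMap id = [] then none
      else if (revisions.filterMap id).filter is_letter_revision ≠ []
        then PySem.List.max? ((revisions.filterMap id).filter is_letter_revision) (fun r => r)
        else (revisions.filterMap id).foldl
          (fun acc x =>
            match acc with
            | none => some x
            | some m => if pyTupLt (_revision_sort_key (some m)) (_revision_sort_key (some x)) then some x else some m)
          none)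
      = maxF pyTupLt pvAltKey none (revisions.filterMap id)
    exact A_eq_unified (revisions.filterMap id)
  rw [hA, hB]
  cases maxF pyTupLt pvAltKey none (revisions.filterMap id) <;> rfl
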